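-- pv_equiv track=rewrite | github.com/trifonov-m/MIPT_stepik | deep learning mipt/test.py | cumsum_and_erase
-- ===== SOURCE A (Python) =====
-- def cumsum_and_erase(a, erase=1):
--     ch = a[0]
--     if ch != erase:
--         B = [ch]
--     else:
--         B = []
--     for i in range(1, len(a)):
--         ch += a[i]
--         if ch != erase:
--             B.append(ch)
--     return B
-- ===== SOURCE B (Python) =====
-- def cumsum_and_erase(a, erase=1):
--     if not a:
--         return []
--     out = []
--     s = sum(a)
--     # walk the list backwards: s is the prefix sum ending at the current index
--     for x in reversed(a):
--         if s != erase:
--             out.append(s)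
--         s -= x
--     out.reverse()
--     return out
-- ===== Notes on version B (the rewrite author's own statement) =====
-- stated objective: alternative
-- what changed: B first computes the total sum, then walks the list in reverse, recovering each prefix sum by subtraction and emitting kept values back-to-front, reversing once at the end, instead of A's forward loop with a special-cased first element and a growing running sum.
-- crash fix: On the empty list A raises IndexError (it reads a[0] before the loop) while B returns an empty list. — e.g. on cumsum_and_erase([], 1): A raises IndexError, B returns []
import Mathlib
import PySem

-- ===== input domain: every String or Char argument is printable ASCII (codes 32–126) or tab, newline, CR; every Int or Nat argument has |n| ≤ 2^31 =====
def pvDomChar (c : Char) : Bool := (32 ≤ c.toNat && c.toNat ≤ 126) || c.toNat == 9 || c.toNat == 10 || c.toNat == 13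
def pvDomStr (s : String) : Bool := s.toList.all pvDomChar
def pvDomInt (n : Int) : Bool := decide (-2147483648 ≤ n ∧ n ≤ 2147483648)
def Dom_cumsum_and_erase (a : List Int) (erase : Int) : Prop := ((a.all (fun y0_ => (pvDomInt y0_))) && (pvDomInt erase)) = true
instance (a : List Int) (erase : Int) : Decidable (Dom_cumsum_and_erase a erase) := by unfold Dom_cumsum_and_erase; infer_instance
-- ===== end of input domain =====

-- B computes the total sum and walks the list in reverse, recovering each prefix sum by
-- subtraction and building the kept values back-to-front (one final reverse); on the empty
-- list A raises IndexError while B returns [].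

-- ===== PORT A =====
-- ch = a[0]; branch on first element; then for i in range(1, len(a)): accumulate and conditionally append.
def cumsum_and_erase (a : List Int) (erase : Int) : List Int :=
  match PySem.List.pyGet? a 0 with
  | none => []   -- IndexError in Python; excluded by Pre_
  | some ch0 =>
    let B0 : List Int := if ch0 ≠ erase then [ch0] else []
    ((PySem.List.pyRange 1 a.length 1).foldl
      (fun (st : Int × List Int) i =>
        let ch := st.1 + PySem.List.pyGetD a i 0
        (ch, if ch ≠ erase then st.2 ++ [ch] else st.2))
      (ch0, B0)).2

-- ===== PORT B =====
-- s = sum(a); for x in reversed(a): emit s if s != erase, then s -= x; reverse at the end.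
def cumsum_and_erase_alt (a : List Int) (erase : Int) : List Int :=
  if a = [] then []
  else
    let out := (a.reverse.foldl
      (fun (st : Int × List Int) x =>
        (st.1 - x, if st.1 ≠ erase then st.2 ++ [st.1] else st.2))
      (a.sum, [])).2
    out.reverse

-- ===== PRECONDITION & SPEC =====
-- A reads the first element before its loop, so it raises IndexError on the empty list.
def Pre_cumsum_and_erase (a : List Int) (erase : Int) : Prop := a ≠ []
instance (a : List Int) (erase : Int) : Decidable (Pre_cumsum_and_erase a erase) := by unfold Pre_cumsum_and_erase; infer_instance
def pvWitness_cumsum_and_erase : List Int × Int := ([1, 2, -2], 1)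

-- On the empty list A raises IndexError (it reads a[0] before the loop) while B returns an empty list.
def Raises_cumsum_and_erase (a : List Int) (erase : Int) : Prop := a = []
instance (a : List Int) (erase : Int) : Decidable (Raises_cumsum_and_erase a erase) := by unfold Raises_cumsum_and_erase; infer_instance
def pvRaiseWitness_cumsum_and_erase : List Int × Int := ([], 1)
def pvRaiseWitnessOut_cumsum_and_erase : List Int := []

def Spec_cumsum_and_erase (a : List Int) (erase : Int) (out : List Int) : Prop := out = cumsum_and_erase_alt a erase
instance (a : List Int) (erase : Int) (out : List Int) : Decidable (Spec_cumsum_and_erase a erase out) := by unfold Spec_cumsum_and_erase; infer_instance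

-- ===== CLAIM (what is proved, stated in full; the proofs are below) =====
def Claim_equal_cumsum_and_erase : Prop := ∀ (a : List Int) (erase : Int), Dom_cumsum_and_erase a erase → Pre_cumsum_and_erase a erase → Spec_cumsum_and_erase a erase (cumsum_and_erase a erase)
def Claim_raises_cumsum_and_erase : Prop := (∀ (a : List Int) (erase : Int), Dom_cumsum_and_erase a erase → Raises_cumsum_and_erase a erase → ¬ Pre_cumsum_and_erase a erase) ∧ (Dom_cumsum_and_erase (pvRaiseWitness_cumsum_and_erase.1) (pvRaiseWitness_cumsum_and_erase.2) ∧ Raises_cumsum_and_erase (pvRaiseWitness_cumsum_and_erase.1) (pvRaiseWitness_cumsum_and_erase.2) ∧ cumsum_and_erase_alt (pvRaiseWitness_cumsum_and_erase.1) (pvRaiseWitness_cumsum_and_erase.2) = pvRaiseWitnessOut_cumsum_and_erase)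

-- ===== LEMMAS AND PROOFS =====

/-- Prefix sums of `xs` starting from running total `s`. -/
def pvScan (s : Int) : List Int → List Int
  | [] => []
  | x :: xs => (s + x) :: pvScan (s + x) xs

/-- Values emitted by B's backward walk: current total first, then subtract as we go. -/
def pvDown (erase s : Int) : List Int → List Int
  | [] => []
  | x :: xs => (if s ≠ erase then [s] else []) ++ pvDown erase (s - x) xs

/-- A's fused loop over the tail values appends the filtered prefix sums. -/
lemma aFold_eq (erase : Int) (xs : List Int) : ∀ (s : Int) (B : List Int),
    (xs.foldl (fun (st : Int × List Int) x =>
      (st.1 + x, if st.1 + x ≠ erase then st.2 ++ [st.1 + x] else st.2)) (s, B)).2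
      = B ++ (pvScan s xs).filter (fun v => v ≠ erase) := by
  induction xs with
  | nil => intro s B; simp [pvScan]
  | cons x xs ih =>
    intro s B
    simp only [List.foldl_cons, pvScan, List.filter_cons]
    rw [ih]
    by_cases h : s + x = erase <;> simp [h]

/-- B's backward loop appends exactly `pvDown`. -/
lemma bFold_eq (erase : Int) (ys : List Int) : ∀ (s : Int) (acc : List Int),
    (ys.foldl (fun (st : Int × List Int) x =>
      (st.1 - x, if st.1 ≠ erase then st.2 ++ [st.1] else st.2)) (s, acc)).2
      = acc ++ pvDown erase s ys := by
  induction ys with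
  | nil => intro s acc; simp [pvDown]
  | cons y ys ih =>
    intro s acc
    simp only [List.foldl_cons, pvDown]
    rw [ih]
    by_cases h : s = erase <;> simp [h]

lemma pvScan_append_singleton (s y : Int) (xs : List Int) :
    pvScan s (xs ++ [y]) = pvScan s xs ++ [s + xs.sum + y] := by
  induction xs generalizing s with
  | nil => simp [pvScan]
  | cons x xs ih => simp [pvScan, ih, add_assoc]

/-- Reversing the backward walk gives the filtered forward prefix sums. -/
lemma pvDown_reverse (erase : Int) (xs : List Int) : ∀ (s : Int),
    (pvDown erase (s + xs.sum) xs.reverse).reverse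
      = (pvScan s xs).filter (fun v => v ≠ erase) := by
  induction xs using List.reverseRecOn with
  | nil => intro s; simp [pvDown, pvScan]
  | append_singleton ys y ih =>
    intro s
    rw [List.reverse_append, List.reverse_singleton, List.singleton_append]
    simp only [pvDown, List.sum_append, List.sum_singleton, List.reverse_append]
    have h1 : s + (ys.sum + y) - y = s + ys.sum := by ring
    rw [h1, ih s, pvScan_append_singleton, List.filter_append]
    by_cases h : s + ys.sum + y = erase <;>
      simp [← add_assoc, h]

-- ===== VERDICT (by name: the statement is the Claim_ definition above) =====
theorem cumsum_and_erase_spec : Claim_equal_cumsum_and_erase := by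
  intro a erase _ hpre
  unfold Spec_cumsum_and_erase cumsum_and_erase cumsum_and_erase_alt
  match a, hpre with
  | x :: xs, _ =>
    rw [PySem.List.pyGet?_zero_cons]
    dsimp only
    rw [PySem.List.foldl_pyRange_pyGetD' (x :: xs) 0
      (fun (st : Int × List Int) v =>
        (st.1 + v, if st.1 + v ≠ erase then st.2 ++ [st.1 + v] else st.2))
      (x, if x ≠ erase then [x] else []) (by omega : (0 : Int) ≤ 1)]
    simp only [Int.toNat_one, List.drop_succ_cons, List.drop_zero]
    rw [aFold_eq]
    rw [if_neg (List.cons_ne_nil x xs), bFold_eq, List.nil_append]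
    have := pvDown_reverse erase (x :: xs) 0
    rw [zero_add] at this
    rw [this]
    simp only [pvScan, zero_add, List.filter_cons]
    by_cases h : x = erase <;> simp [h]

@[simp] theorem cumsum_and_erase_raises : Claim_raises_cumsum_and_erase := by
  unfold Claim_raises_cumsum_and_erase
  exact ⟨fun a erase _ hr hp => hp hr, by decide⟩
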